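-- pv_equiv track=rewrite | github.com/anchorgroupops/Dugout | tools/runtime_ops.py | _section_windows
-- ===== SOURCE A (Python) =====
-- def _norm_token(token: str) -> str:
--     return (token or "").strip().strip('"').strip("'")
--
-- def _section_windows(rows: list[list[str]], section_name: str) -> list[list[str]]:
--     out: list[list[str]] = []
--     low_name = section_name.lower()
--     for i, row in enumerate(rows):
--         cells = [_norm_token(c) for c in row]
--         if not any(c.lower() == low_name for c in cells if c):
--             continue
--
--         window: list[str] = []
--         for j in range(i + 1, len(rows)):
--             r = [_norm_token(c) for c in rows[j]]
--             # section ends on full blank row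
--             if not any(r):
--                 break
--             for c in r:
--                 if c:
--                     window.append(c)
--         out.append(window)
--     return out
-- ===== SOURCE B (Python) =====
-- def _norm_token(token: str) -> str:
--     return (token or "").strip().strip('"').strip("'")
--
-- def _section_windows(rows: list[list[str]], section_name: str) -> list[list[str]]:
--     # Single pass: maintain currently-open windows; a blank row closes them,
--     # a matching row starts a new empty window (its own cells go only to earlier windows).
--     low_name = section_name.lower()
--     closed: list[list[str]] = []
--     open_ws: list[list[str]] = []
--     for row in rows:
--         cells = [c for c in (_norm_token(x) for x in row) if c]
--         if not cells:
--             closed.extend(open_ws)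
--             open_ws = []
--             continue
--         for w in open_ws:
--             w.extend(cells)
--         if any(c.lower() == low_name for c in cells):
--             open_ws.append([])
--     return closed + open_ws
-- ===== Notes on version B (the rewrite author's own statement) =====
-- stated objective: alternative
-- what changed: Replaces the nested forward re-scan (an inner loop re-normalizing later rows for each matching row) with a single pass over the rows that normalizes each row once and maintains the list of currently-open windows, closing them on a blank row and flushing the rest at the end.
import Mathlib
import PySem

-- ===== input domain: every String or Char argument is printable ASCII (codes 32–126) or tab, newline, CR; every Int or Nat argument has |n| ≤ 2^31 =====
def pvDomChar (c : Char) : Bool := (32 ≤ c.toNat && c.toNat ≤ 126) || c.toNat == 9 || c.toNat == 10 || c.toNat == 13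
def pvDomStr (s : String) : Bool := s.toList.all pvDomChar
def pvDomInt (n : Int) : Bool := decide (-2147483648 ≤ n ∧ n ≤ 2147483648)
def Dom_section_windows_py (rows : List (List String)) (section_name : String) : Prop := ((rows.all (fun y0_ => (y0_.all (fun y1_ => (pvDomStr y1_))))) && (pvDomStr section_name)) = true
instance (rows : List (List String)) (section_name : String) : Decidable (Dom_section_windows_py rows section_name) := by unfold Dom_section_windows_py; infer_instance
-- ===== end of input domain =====

-- B replaces A's nested forward re-scan with a single pass over the rows that maintains the currently-open windows (each row normalized once).


-- ===== PORT A =====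
-- _norm_token: '(token or "")' is the identity on str (an empty token stays empty), then .strip().strip('"').strip("'")
def pvNorm (t : String) : String :=
  PySem.Str.stripChars (PySem.Str.stripChars (PySem.Str.strip t) "\"") "'"

-- A's inner loop: for j in range(i+1, len(rows)): … break on blank row, append non-empty cells
def pvInnerA (rows : List (List String)) : List Int → List String → List String
  | [], window => window
  | j :: js, window =>
      let r := (PySem.List.pyGetD rows j []).map pvNorm
      if r.any (fun c => c != "") = false then window
      else pvInnerA rows js (r.foldl (fun w c => if c != "" then w ++ [c] else w) window)

def section_windows_py (rows : List (List String)) (section_name : String) : List (List String) :=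
  let low_name := PySem.Str.lower section_name
  (PySem.List.enumerate rows).foldl
    (fun out p =>
      let cells := p.2.map pvNorm
      if (cells.any (fun c => c != "" && PySem.Str.lower c == low_name)) = false then out
      else out ++ [pvInnerA rows (PySem.List.pyRange (p.1 + 1) (rows.length : Int) 1) []])
    []

-- ===== PORT B =====
def section_windows_py_alt (rows : List (List String)) (section_name : String) : List (List String) :=
  let low_name := PySem.Str.lower section_name
  let st := rows.foldl
    (fun (st : List (List String) × List (List String)) row =>
      let cells := (row.map pvNorm).filter (fun c => c != "")
      if cells.isEmpty then (st.1 ++ st.2, [])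
      else
        let opens := st.2.map (fun w => w ++ cells)
        if cells.any (fun c => PySem.Str.lower c == low_name) then (st.1, opens ++ [[]])
        else (st.1, opens))
    ([], [])
  st.1 ++ st.2

-- ===== PRECONDITION & SPEC =====
def Spec_section_windows_py (rows : List (List String)) (section_name : String) (out : List (List String)) : Prop := out = section_windows_py_alt rows section_name
instance (rows : List (List String)) (section_name : String) (out : List (List String)) : Decidable (Spec_section_windows_py rows section_name out) := by unfold Spec_section_windows_py; infer_instance

-- ===== CLAIM (what is proved, stated in full; the proofs are below) =====
def Claim_equal_section_windows_py : Prop := ∀ (rows : List (List String)) (section_name : String), Dom_section_windows_py rows section_name → Spec_section_windows_py rows section_name (section_windows_py rows section_name)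

-- ===== LEMMAS AND PROOFS =====

-- normalized non-empty cells of a row
def pvCells (row : List String) : List String := (row.map pvNorm).filter (fun c => c != "")

def pvIsMatch (low : String) (row : List String) : Bool :=
  (pvCells row).any (fun c => PySem.Str.lower c == low)

-- the window collected after a section row: cells until the first blank row
def pvWindow : List (List String) → List String
  | [] => []
  | r :: t => if pvCells r = [] then [] else pvCells r ++ pvWindow t

-- the common characterization of both programs' output
def pvOut (low : String) : List (List String) → List (List String)
  | [] => []
  | r :: t => if pvIsMatch low r then pvWindow t :: pvOut low t else pvOut low t

-- A's outer-loop body, named (definitionally equal to the lambda in the port)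
def pvStepA (rows : List (List String)) (low : String)
    (out : List (List String)) (p : Int × List String) : List (List String) :=
  if ((p.2.map pvNorm).any (fun c => c != "" && PySem.Str.lower c == low)) = false then out
  else out ++ [pvInnerA rows (PySem.List.pyRange (p.1 + 1) (rows.length : Int) 1) []]

-- B's loop body, named (definitionally equal to the lambda in the port)
def pvStepB (low : String) (st : List (List String) × List (List String))
    (row : List String) : List (List String) × List (List String) :=
  if (pvCells row).isEmpty then (st.1 ++ st.2, [])
  else if (pvCells row).any (fun c => PySem.Str.lower c == low) then
    (st.1, st.2.map (fun w => w ++ pvCells row) ++ [[]])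
  else (st.1, st.2.map (fun w => w ++ pvCells row))

theorem pvCells_nil_iff (r : List String) :
    pvCells r = [] ↔ ((r.map pvNorm).any fun c => c != "") = false := by
  simp [pvCells, List.filter_eq_nil_iff, List.any_eq_false]

theorem pvMatch_eq (low : String) (r : List String) :
    ((r.map pvNorm).any fun c => c != "" && PySem.Str.lower c == low) = pvIsMatch low r := by
  simp [pvIsMatch, pvCells, List.any_filter]

theorem pvInnerA_eq (rows : List (List String)) (t : List (List String)) :
    ∀ (a : Nat) (window : List String), rows.drop a = t →
      pvInnerA rows (PySem.List.pyRange (a : Int) (rows.length : Int) 1) window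
        = window ++ pvWindow t := by
  induction t with
  | nil =>
    intro a window h
    have ha : rows.length ≤ a := by
      by_contra hc
      exact absurd h (by simp [List.drop_eq_nil_iff]; omega)
    rw [PySem.List.pyRange_one_eq_nil (by exact_mod_cast ha)]
    simp [pvInnerA, pvWindow]
  | cons r t' ih =>
    intro a window h
    have ha : a < rows.length := by
      by_contra hc
      rw [List.drop_eq_nil_iff.mpr (by omega)] at h
      exact absurd h (by simp)
    have hget : rows.getD a [] = r := by
      have : rows[a]? = some r := by
        rw [← List.head?_drop, h]; rfl
      simp [List.getD, this]
    have hdrop' : rows.drop (a + 1) = t' := by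
      rw [← List.tail_drop, h]; rfl
    rw [PySem.List.pyRange_one_cons (by exact_mod_cast ha)]
    show pvInnerA rows (((a : Int)) :: PySem.List.pyRange ((a : Int) + 1) (rows.length : Int) 1) window = _
    simp only [pvInnerA, PySem.List.pyGetD_natCast, hget]
    by_cases hb : pvCells r = []
    · rw [if_pos ((pvCells_nil_iff r).mp hb)]
      simp [pvWindow, hb]
    · have hany : ((r.map pvNorm).any fun c => c != "") = true := by
        rcases Bool.eq_false_or_eq_true ((r.map pvNorm).any fun c => c != "") with ht | hf
        · exact ht
        · exact absurd ((pvCells_nil_iff r).mpr hf) hb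
      rw [if_neg (by simp [hany])]
      have hfold : ((r.map pvNorm).foldl (fun w c => if c != "" then w ++ [c] else w) window)
          = window ++ pvCells r := by
        simpa [pvCells] using
          PySem.List.foldl_append_if (fun c : String => c != "") id (r.map pvNorm) window
      rw [hfold]
      have hcast : ((a : Int) + 1) = ((a + 1 : Nat) : Int) := by push_cast; ring
      rw [hcast, ih (a + 1) (window ++ pvCells r) hdrop']
      simp [pvWindow, hb]

theorem portA_eq (rows : List (List String)) (low : String) (t : List (List String)) :
    ∀ (k : Nat) (out : List (List String)), rows.drop k = t →
      (PySem.List.enumerate t (k : Int)).foldl (pvStepA rows low) out = out ++ pvOut low t := by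
  induction t with
  | nil => intro k out h; simp [PySem.List.enumerate_nil, pvOut]
  | cons r t' ih =>
    intro k out h
    have hdrop' : rows.drop (k + 1) = t' := by
      rw [← List.tail_drop, h]; rfl
    rw [PySem.List.enumerate_cons]
    simp only [List.foldl_cons]
    have hcast : ((k : Int) + 1) = ((k + 1 : Nat) : Int) := by push_cast; ring
    by_cases hm : pvIsMatch low r = true
    · have hstep : pvStepA rows low out ((k : Int), r)
          = out ++ [pvInnerA rows (PySem.List.pyRange ((k : Int) + 1) (rows.length : Int) 1) []] := by
        unfold pvStepA
        rw [if_neg (by rw [pvMatch_eq, hm]; simp)]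
      rw [hstep, hcast, pvInnerA_eq rows t' (k + 1) [] hdrop', ih (k + 1) _ hdrop']
      simp [pvOut, hm]
    · have hstep : pvStepA rows low out ((k : Int), r) = out := by
        unfold pvStepA
        rw [if_pos (by simp only [Bool.not_eq_true] at hm; rw [pvMatch_eq, hm])]
      rw [hstep, hcast, ih (k + 1) out hdrop']
      simp only [Bool.not_eq_true] at hm
      simp [pvOut, hm]

theorem portB_eq (low : String) (t : List (List String)) :
    ∀ (closed opens : List (List String)),
      (t.foldl (pvStepB low) (closed, opens)).1 ++ (t.foldl (pvStepB low) (closed, opens)).2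
        = closed ++ opens.map (fun w => w ++ pvWindow t) ++ pvOut low t := by
  induction t with
  | nil =>
    intro closed opens
    simp [pvWindow, pvOut]
  | cons r t' ih =>
    intro closed opens
    simp only [List.foldl_cons]
    by_cases hb : pvCells r = []
    · have hstep : pvStepB low (closed, opens) r = (closed ++ opens, []) := by
        unfold pvStepB
        rw [if_pos (by simp [hb])]
      have hm : pvIsMatch low r = false := by simp [pvIsMatch, hb]
      rw [hstep, ih (closed ++ opens) []]
      simp [pvWindow, pvOut, hb, hm]
    · have hE : (pvCells r).isEmpty = false := by simpa [List.isEmpty_iff] using hb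
      by_cases hm : pvIsMatch low r = true
      · have hstep : pvStepB low (closed, opens) r
            = (closed, opens.map (fun w => w ++ pvCells r) ++ [[]]) := by
          unfold pvStepB
          rw [if_neg (by simp [hE]), if_pos (by rw [show ((pvCells r).any fun c => PySem.Str.lower c == low) = pvIsMatch low r from rfl, hm])]
        rw [hstep, ih closed _]
        simp [pvWindow, pvOut, hb, hm, List.map_map, Function.comp_def, List.append_assoc]
      · simp only [Bool.not_eq_true] at hm
        have hstep : pvStepB low (closed, opens) r
            = (closed, opens.map (fun w => w ++ pvCells r)) := by
          unfold pvStepB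
          rw [if_neg (by simp [hE]), if_neg (by rw [show ((pvCells r).any fun c => PySem.Str.lower c == low) = pvIsMatch low r from rfl, hm]; simp)]
        rw [hstep, ih closed _]
        simp [pvWindow, pvOut, hb, hm, List.map_map, Function.comp_def, List.append_assoc]

-- the ports, restated through the named step functions (definitional)
theorem portA_unfold (rows : List (List String)) (section_name : String) :
    section_windows_py rows section_name
      = (PySem.List.enumerate rows ((0 : Nat) : Int)).foldl
          (pvStepA rows (PySem.Str.lower section_name)) [] := rfl

theorem portB_unfold (rows : List (List String)) (section_name : String) :
    section_windows_py_alt rows section_name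
      = (rows.foldl (pvStepB (PySem.Str.lower section_name)) ([], [])).1
          ++ (rows.foldl (pvStepB (PySem.Str.lower section_name)) ([], [])).2 := rfl

-- ===== VERDICT (by name: the statement is the Claim_ definition above) =====
theorem section_windows_py_spec : Claim_equal_section_windows_py := by
  intro rows section_name _
  unfold Spec_section_windows_py
  rw [portA_unfold, portB_unfold,
    portA_eq rows (PySem.Str.lower section_name) rows 0 [] (by simp),
    portB_eq (PySem.Str.lower section_name) rows [] []]
  simp
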